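-- pv_equiv track=rewrite | github.com/Ace1928/eidosian_forge | archive_forge/src/archive_forge/func_while_loop_usecase5.py | while_loop_usecase5
-- ===== SOURCE A (Python) =====
-- def while_loop_usecase5(x, y):
--     result = 0
--     while result < x:
--         if result > y:
--             result += 2
--             continue
--         result += 1
--     return result
-- ===== SOURCE B (Python) =====
-- def while_loop_usecase5(x, y):
--     # Closed form: climb by 1 to b = min(x, max(y+1, 0)), then jump by 2,
--     # overshooting x by 1 exactly when x - b is odd.
--     if x <= 0:
--         return 0
--     b = min(x, max(y + 1, 0))
--     return x + (x - b) % 2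
-- ===== Notes on version B (the rewrite author's own statement) =====
-- stated objective: faster
-- what changed: Replaced the step-by-1/step-by-2 while loop with a closed-form O(1) formula: the loop climbs to b = min(x, max(y+1, 0)) and then jumps by 2, overshooting x by 1 iff x-b is odd.
import Mathlib
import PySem

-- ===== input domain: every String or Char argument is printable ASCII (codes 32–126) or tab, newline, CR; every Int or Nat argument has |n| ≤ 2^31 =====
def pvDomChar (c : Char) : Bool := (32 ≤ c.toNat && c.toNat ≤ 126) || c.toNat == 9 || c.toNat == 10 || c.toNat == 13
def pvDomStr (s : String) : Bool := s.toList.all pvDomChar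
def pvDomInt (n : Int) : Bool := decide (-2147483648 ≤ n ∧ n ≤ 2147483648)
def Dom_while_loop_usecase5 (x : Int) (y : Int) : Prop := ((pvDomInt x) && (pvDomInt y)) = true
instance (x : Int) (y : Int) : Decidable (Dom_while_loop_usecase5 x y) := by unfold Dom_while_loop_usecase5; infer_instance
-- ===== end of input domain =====

-- B replaces A's while loop by a closed-form O(1) formula (objective: faster).

-- ===== PORT A =====
-- the while loop: result < x keeps looping; result > y steps by 2, else by 1
def wloopA (x y result : Int) : Int :=
  if result < x then
    if result > y then wloopA x y (result + 2)
    else wloopA x y (result + 1)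
  else result
termination_by (x - result).toNat
decreasing_by all_goals omega

def while_loop_usecase5 (x : Int) (y : Int) : Int := wloopA x y 0

-- ===== PORT B =====
def while_loop_usecase5_alt (x : Int) (y : Int) : Int :=
  if x ≤ 0 then 0
  else
    let b := min x (max (y + 1) 0)
    x + PySem.Int.mod (x - b) 2

-- ===== PRECONDITION & SPEC =====
def Spec_while_loop_usecase5 (x : Int) (y : Int) (out : Int) : Prop := out = while_loop_usecase5_alt x y
instance (x : Int) (y : Int) (out : Int) : Decidable (Spec_while_loop_usecase5 x y out) := by unfold Spec_while_loop_usecase5; infer_instance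

-- ===== CLAIM (what is proved, stated in full; the proofs are below) =====
def Claim_equal_while_loop_usecase5 : Prop := ∀ (x : Int) (y : Int), Dom_while_loop_usecase5 x y → Spec_while_loop_usecase5 x y (while_loop_usecase5 x y)

-- ===== LEMMAS AND PROOFS =====

-- Phase 2: once result > y, the loop steps by 2 until ≥ x.
theorem wloopA_gt (x y : Int) : ∀ (r : Int), y < r →
    wloopA x y r = if r < x then x + (x - r) % 2 else r := by
  intro r
  induction hn : (x - r).toNat using Nat.strong_induction_on generalizing r with
  | _ n ih =>
    intro hy
    rw [wloopA]
    by_cases hr : r < x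
    · simp only [hr, if_pos, hy, if_pos]
      rw [ih (x - (r + 2)).toNat (by omega) (r + 2) rfl (by omega)]
      split_ifs with h2 <;> omega
    · simp [hr]

-- Phase 1: while result ≤ y (and < x), step by 1.
theorem wloopA_le (x y : Int) : ∀ (r : Int), r ≤ y → r < x →
    wloopA x y r = wloopA x y (min x (y + 1)) := by
  intro r
  induction hn : (x - r).toNat using Nat.strong_induction_on generalizing r with
  | _ n ih =>
    intro hy hr
    rw [wloopA]
    simp only [hr, if_pos, show ¬ (y < r) by omega, if_neg, not_false_iff]
    by_cases h1 : r + 1 ≤ y ∧ r + 1 < x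
    · exact ih (x - (r + 1)).toNat (by omega) (r + 1) rfl h1.1 h1.2
    · have : r + 1 = min x (y + 1) := by omega
      rw [this]

theorem wloopA_stop (x y r : Int) (h : ¬ r < x) : wloopA x y r = r := by
  rw [wloopA]; simp [h]

-- ===== VERDICT (by name: the statement is the Claim_ definition above) =====
theorem while_loop_usecase5_spec : Claim_equal_while_loop_usecase5 := by
  intro x y _
  unfold Spec_while_loop_usecase5 while_loop_usecase5 while_loop_usecase5_alt
  by_cases hx : x ≤ 0
  · rw [wloopA_stop x y 0 (by omega)]; simp [hx]
  · simp only [hx, if_neg, not_false_iff]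
    have hmod : PySem.Int.mod (x - min x (max (y + 1) 0)) 2
        = (x - min x (max (y + 1) 0)) % 2 :=
      PySem.Int.mod_eq_emod_of_pos (by omega)
    by_cases hy : y < 0
    · rw [wloopA_gt x y 0 (by omega)]
      simp only [hmod]
      have : min x (max (y + 1) 0) = max (y + 1) 0 ∨ min x (max (y + 1) 0) = x := by omega
      split_ifs with h <;> omega
    · rw [wloopA_le x y 0 (by omega) (by omega)]
      by_cases hb : min x (y + 1) < x
      · rw [wloopA_gt x y (min x (y + 1)) (by omega)]
        simp only [hb, if_pos, hmod]
        omega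
      · rw [wloopA_stop x y _ hb]
        simp only [hmod]
        omega
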